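-- pv_equiv track=rewrite | github.com/Vipr2G/Prototype | VL2dm_utils.py | sim_seq
-- ===== SOURCE A (Python) =====
-- def sim_seq(sq1,sq2,mod_type):
--     # compare 2 sequences with same mod_type
--     # input format sq1,sq2 both consist of
--     if len(sq1) == 0 or len(sq2) == 0:
--         return False
--
--     if mod_type == 'D':
--         if sq1 == sq2:
--             return True
--         else:
--             return False
--     elif mod_type == 'M':
--         # require child to be a subsequence of parent
--         if len(sq1) > len(sq2):
--             parent = sq1.copy()
--             child = sq2.copy()
--         else:
--             parent = sq2.copy()
--             child = sq1.copy()
--         indices = []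
--         for i in range(len(parent)):
--             if child[0] == parent[i]:
--                 indices.append(i)
--         for index in indices:
--             is_found = True
--             parent_index = index
--             for item in child:
--                 if item != parent[parent_index]:
--                     is_found = False
--                 parent_index += 1
--                 if parent_index >= len(parent):
--                     parent_index = 0
--             if is_found:
--                 return True
--         return False
--     elif mod_type == 'S' or mod_type == 'J':
--         #require all elements of child to be in parent
--         if len(sq1) > len(sq2):
--             parent = sq1.copy()
--             child = sq2.copy()
--         else:
--             parent = sq2.copy()
--             child = sq1.copy()
--         for elem in child:
--             for vals in parent:
--                 if elem == vals:
--                     match = 1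
--                     break
--                 else:
--                     match = 0
--             if match == 0:
--                 return False
--         return True
-- ===== SOURCE B (Python) =====
-- def sim_seq(sq1, sq2, mod_type):
--     if not sq1 or not sq2:
--         return False
--     if mod_type == 'D':
--         return sq1 == sq2
--     if mod_type == 'M':
--         parent, child = (sq1, sq2) if len(sq1) > len(sq2) else (sq2, sq1)
--         doubled = parent + parent
--         m = len(child)
--         return any(doubled[i:i + m] == child for i in range(len(parent)))
--     if mod_type == 'S' or mod_type == 'J':
--         parent, child = (sq1, sq2) if len(sq1) > len(sq2) else (sq2, sq1)
--         return set(child) <= set(parent)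
--     return None
-- ===== Notes on version B (the rewrite author's own statement) =====
-- stated objective: alternative
-- what changed: The 'M' cyclic-match hand loop with manual index wraparound is replaced by slice comparisons against the doubled parent list, and the 'S'/'J' nested membership scan is replaced by a set-subset test (set(child) <= set(parent)); each branch returns its boolean expression directly instead of collecting candidate indices / flag variables.
import Mathlib
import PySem

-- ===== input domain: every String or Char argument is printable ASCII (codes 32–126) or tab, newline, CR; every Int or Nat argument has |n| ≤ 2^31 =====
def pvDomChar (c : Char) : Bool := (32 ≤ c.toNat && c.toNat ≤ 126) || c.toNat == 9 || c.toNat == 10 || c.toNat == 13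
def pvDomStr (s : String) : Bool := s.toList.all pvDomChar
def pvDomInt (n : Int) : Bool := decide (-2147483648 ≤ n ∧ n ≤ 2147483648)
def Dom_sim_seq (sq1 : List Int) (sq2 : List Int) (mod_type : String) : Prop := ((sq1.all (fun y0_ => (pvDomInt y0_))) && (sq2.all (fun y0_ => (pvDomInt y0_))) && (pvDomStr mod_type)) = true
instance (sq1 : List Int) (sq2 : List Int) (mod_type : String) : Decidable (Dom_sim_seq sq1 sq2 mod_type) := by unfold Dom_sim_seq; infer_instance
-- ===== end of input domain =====

-- ===== PORT A =====
-- B replaces the hand-rolled cyclic scan / nested membership loops by doubled-list slices and a set-subset test (alternative decomposition, same results).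

-- inner 'for item in child' loop of A's 'M' branch: state = (is_found, parent_index)
def simMStep (parent : List Int) (st : Bool × Nat) (item : Int) : Bool × Nat :=
  let is_found := if item ≠ parent.getD st.2 0 then false else st.1
  let pi := st.2 + 1
  (is_found, if parent.length ≤ pi then 0 else pi)

def simMInner (parent : List Int) (child : List Int) (index : Nat) : Bool :=
  (child.foldl (simMStep parent) (true, index)).1

def sim_seq (sq1 : List Int) (sq2 : List Int) (mod_type : String) : Option Bool :=
  if sq1.length = 0 ∨ sq2.length = 0 then some false
  else if mod_type = "D" then
    (if sq1 = sq2 then some true else some false)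
  else if mod_type = "M" then
    let pc := if sq1.length > sq2.length then (sq1, sq2) else (sq2, sq1)
    let parent := pc.1
    let child := pc.2
    let indices := (List.range parent.length).foldl
      (fun acc i => if child.getD 0 0 = parent.getD i 0 then acc ++ [i] else acc) []
    some (indices.any (fun index => simMInner parent child index))
  else if mod_type = "S" ∨ mod_type = "J" then
    let pc := if sq1.length > sq2.length then (sq1, sq2) else (sq2, sq1)
    some (pc.2.all (fun elem => pc.1.any (fun vals => elem == vals)))
  else none

-- ===== PORT B =====
def sim_seq_alt (sq1 : List Int) (sq2 : List Int) (mod_type : String) : Option Bool :=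
  if sq1.isEmpty || sq2.isEmpty then some false
  else if mod_type = "D" then some (sq1 == sq2)
  else if mod_type = "M" then
    let pc := if sq1.length > sq2.length then (sq1, sq2) else (sq2, sq1)
    let doubled := pc.1 ++ pc.1
    let m := pc.2.length
    some ((List.range pc.1.length).any (fun i =>
      PySem.List.slice doubled (some (i : Int)) (some ((i : Int) + (m : Int))) == pc.2))
  else if mod_type = "S" ∨ mod_type = "J" then
    let pc := if sq1.length > sq2.length then (sq1, sq2) else (sq2, sq1)
    some (PySem.Set.issubset (PySem.Set.ofList pc.2) (PySem.Set.ofList pc.1))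
  else none

-- ===== PRECONDITION & SPEC =====
def Spec_sim_seq (sq1 : List Int) (sq2 : List Int) (mod_type : String) (out : Option Bool) : Prop := out = sim_seq_alt sq1 sq2 mod_type
instance (sq1 : List Int) (sq2 : List Int) (mod_type : String) (out : Option Bool) : Decidable (Spec_sim_seq sq1 sq2 mod_type out) := by unfold Spec_sim_seq; infer_instance

-- ===== CLAIM (what is proved, stated in full; the proofs are below) =====
def Claim_equal_sim_seq : Prop := ∀ (sq1 : List Int) (sq2 : List Int) (mod_type : String), Dom_sim_seq sq1 sq2 mod_type → Spec_sim_seq sq1 sq2 mod_type (sim_seq sq1 sq2 mod_type)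

-- ===== LEMMAS AND PROOFS =====

-- what A's inner loop tests: child matches parent cyclically starting at i
def matchesFrom (parent : List Int) : Nat → List Int → Bool
  | _, [] => true
  | i, c :: cs =>
      (c == parent.getD i 0) && matchesFrom parent (if parent.length ≤ i + 1 then 0 else i + 1) cs

theorem simMInner_foldl_eq (parent : List Int) : ∀ (child : List Int) (b : Bool) (i : Nat),
    (child.foldl (simMStep parent) (b, i)).1 = (b && matchesFrom parent i child)
  | [], b, i => by simp [matchesFrom]
  | c :: cs, b, i => by
    have hstep : simMStep parent (b, i) c
        = (b && (c == parent.getD i 0), if parent.length ≤ i + 1 then 0 else i + 1) := by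
      unfold simMStep
      by_cases h : c = parent.getD i 0 <;> cases b <;> simp [h, Bool.beq_eq_decide_eq]
    rw [List.foldl_cons, hstep, simMInner_foldl_eq parent cs]
    rw [matchesFrom, Bool.and_assoc]

theorem simMInner_eq_matchesFrom (parent child : List Int) (i : Nat) :
    simMInner parent child i = matchesFrom parent i child := by
  unfold simMInner
  rw [simMInner_foldl_eq]
  simp

theorem take_drop_double_eq_matchesFrom (p : List Int) : ∀ (cs : List Int) (i : Nat),
    i < p.length → cs.length ≤ p.length →
    ((((p ++ p).drop i).take cs.length) = cs ↔ matchesFrom p i cs = true)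
  | [], i, _, _ => by simp [matchesFrom]
  | c :: cs, i, hi, hlen => by
    have hi2 : i < (p ++ p).length := by simp; omega
    have hcs : cs.length ≤ p.length := by
      have := hlen; simp only [List.length_cons] at this; omega
    rw [List.drop_eq_getElem_cons hi2, List.length_cons, List.take_succ_cons]
    have hget : (p ++ p)[i] = p[i] := List.getElem_append_left hi
    have hgetD : p.getD i 0 = p[i] := List.getD_eq_getElem p 0 hi
    rw [List.cons_eq_cons, hget]
    by_cases hwrap : p.length ≤ i + 1
    · have hip : i + 1 = p.length := by omega
      have hdrop : (p ++ p).drop (i + 1) = p := by rw [hip]; exact List.drop_left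
      have htake : p.take cs.length = (p ++ p).take cs.length :=
        (List.take_append_of_le_length hcs).symm
      have h0 : (0 : Nat) < p.length := by omega
      have ih := take_drop_double_eq_matchesFrom p cs 0 h0 hcs
      simp only [List.drop_zero] at ih
      rw [matchesFrom, if_pos hwrap]
      rw [hdrop, htake]
      simp only [Bool.and_eq_true, beq_iff_eq, hgetD, ih]
      exact ⟨fun ⟨h1, h2⟩ => ⟨h1.symm, h2⟩, fun ⟨h1, h2⟩ => ⟨h1.symm, h2⟩⟩
    · have hi1 : i + 1 < p.length := by omega
      have ih := take_drop_double_eq_matchesFrom p cs (i + 1) hi1 hcs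
      rw [matchesFrom, if_neg hwrap]
      simp only [Bool.and_eq_true, beq_iff_eq, hgetD, ih]
      exact ⟨fun ⟨h1, h2⟩ => ⟨h1.symm, h2⟩, fun ⟨h1, h2⟩ => ⟨h1.symm, h2⟩⟩

theorem sim_seq_M_eq (parent child : List Int) (hc : child ≠ [])
    (hlen : child.length ≤ parent.length) :
    (((List.range parent.length).foldl
      (fun acc i => if child.getD 0 0 = parent.getD i 0 then acc ++ [i] else acc) []).any
        (fun index => simMInner parent child index))
    = (List.range parent.length).any (fun i =>
        PySem.List.slice (parent ++ parent) (some (i : Int)) (some ((i : Int) + (child.length : Int))) == child) := by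
  obtain ⟨c, cs, rfl⟩ : ∃ c cs, child = c :: cs := by
    cases child with
    | nil => exact absurd rfl hc
    | cons c cs => exact ⟨c, cs, rfl⟩
  have hfold : ((List.range parent.length).foldl
      (fun acc i => if (c :: cs).getD 0 0 = parent.getD i 0 then acc ++ [i] else acc) ([] : List Nat))
      = (List.range parent.length).filter (fun i => (c :: cs).getD 0 0 == parent.getD i 0) := by
    have h := PySem.List.foldl_append_if (fun i => (c :: cs).getD 0 0 == parent.getD i 0)
      (fun i : Nat => i) (List.range parent.length) []
    simpa using h
  rw [hfold, List.any_filter]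
  have hpt : ∀ i, i < parent.length →
      ((((c :: cs).getD 0 0 == parent.getD i 0) && simMInner parent (c :: cs) i) = true ↔
       (PySem.List.slice (parent ++ parent) (some (i : Int))
          (some ((i : Int) + ((c :: cs).length : Int))) == (c :: cs)) = true) := by
    intro i hi
    rw [PySem.List.slice_natCast_add, beq_iff_eq,
      take_drop_double_eq_matchesFrom parent (c :: cs) i hi hlen]
    rw [simMInner_eq_matchesFrom]
    rw [show matchesFrom parent i (c :: cs)
        = ((c == parent.getD i 0) &&
            matchesFrom parent (if parent.length ≤ i + 1 then 0 else i + 1) cs) from rfl]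
    simp only [List.getD_cons_zero, Bool.and_eq_true]
    tauto
  rw [Bool.eq_iff_iff]
  simp only [List.any_eq_true, List.mem_range]
  exact ⟨fun ⟨i, hi, h⟩ => ⟨i, hi, (hpt i hi).mp h⟩,
         fun ⟨i, hi, h⟩ => ⟨i, hi, (hpt i hi).mpr h⟩⟩

theorem sim_seq_S_eq (parent child : List Int) :
    (child.all (fun elem => parent.any (fun vals => elem == vals)))
    = PySem.Set.issubset (PySem.Set.ofList child) (PySem.Set.ofList parent) := by
  rw [Bool.eq_iff_iff, List.all_eq_true, PySem.Set.issubset_iff]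
  constructor
  · intro h x hx
    rw [PySem.Set.mem_ofList] at hx ⊢
    have := h x hx
    simp only [List.any_eq_true, beq_iff_eq] at this
    obtain ⟨v, hv, rfl⟩ := this
    exact hv
  · intro h x hx
    have := h x (by rw [PySem.Set.mem_ofList]; exact hx)
    rw [PySem.Set.mem_ofList] at this
    simp only [List.any_eq_true, beq_iff_eq]
    exact ⟨x, this, rfl⟩

-- ===== VERDICT (by name: the statement is the Claim_ definition above) =====
theorem sim_seq_spec : Claim_equal_sim_seq := by
  intro sq1 sq2 mod_type _
  unfold Spec_sim_seq sim_seq sim_seq_alt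
  by_cases h0 : sq1.length = 0 ∨ sq2.length = 0
  · rcases h0 with h | h <;> rw [List.length_eq_zero_iff] at h <;> simp [h]
  · rw [not_or] at h0
    obtain ⟨ha, hb⟩ := h0
    have h1 : sq1 ≠ [] := by intro h; exact ha (by simp [h])
    have h2 : sq2 ≠ [] := by intro h; exact hb (by simp [h])
    have he : (sq1.isEmpty || sq2.isEmpty) = false := by
      simp [h1, h2]
    rw [if_neg (by tauto : ¬(sq1.length = 0 ∨ sq2.length = 0))]
    simp only [he, Bool.false_eq_true, if_false]
    by_cases hD : mod_type = "D"
    · simp only [if_pos hD]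
      by_cases h : sq1 = sq2 <;> simp [h]
    · simp only [if_neg hD]
      by_cases hM : mod_type = "M"
      · simp only [if_pos hM]
        by_cases hgt : sq1.length > sq2.length
        · simp only [if_pos hgt]
          rw [sim_seq_M_eq sq1 sq2 h2 (le_of_lt hgt)]
        · simp only [if_neg hgt]
          rw [sim_seq_M_eq sq2 sq1 h1 (by omega)]
      · simp only [if_neg hM]
        by_cases hSJ : mod_type = "S" ∨ mod_type = "J"
        · simp only [if_pos hSJ]
          by_cases hgt : sq1.length > sq2.length
          · simp only [if_pos hgt]; rw [sim_seq_S_eq]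
          · simp only [if_neg hgt]; rw [sim_seq_S_eq]
        · simp only [if_neg hSJ]
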